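-- pv_equiv track=rewrite | github.com/tiru777/PythonDSA | big_o_notations.py | func_complexity_O_n_loop
-- ===== SOURCE A (Python) =====
-- def func_complexity_O_n_loop(n: int) -> int:
--     """
--
--     :param n: number
--     :return: how much time complexity(iterations) O(n)
--     even in multiple loop we are making with big O(n)
--     """
--     c = 0
--     i = 0
--     j = 0
--     while i < n:  # 0<5
--         while j < n:  # 0<5,1<5,2<5,3<5,4<5
--             c = c + 1  # 1,2,3,4,5
--             j = j + 1  # 1,2,3,4,5
--             i = i + 1
--     return c
-- ===== SOURCE B (Python) =====
-- def func_complexity_O_n_loop(n: int) -> int: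
--     # closed form: the coupled loops iterate exactly n times for n > 0, else 0
--     return n if n > 0 else 0
-- ===== Notes on version B (the rewrite author's own statement) =====
-- stated objective: simpler
-- what changed: Replaced the two coupled while-loops counting iterations with the closed form max(n, 0).
import Mathlib
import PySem

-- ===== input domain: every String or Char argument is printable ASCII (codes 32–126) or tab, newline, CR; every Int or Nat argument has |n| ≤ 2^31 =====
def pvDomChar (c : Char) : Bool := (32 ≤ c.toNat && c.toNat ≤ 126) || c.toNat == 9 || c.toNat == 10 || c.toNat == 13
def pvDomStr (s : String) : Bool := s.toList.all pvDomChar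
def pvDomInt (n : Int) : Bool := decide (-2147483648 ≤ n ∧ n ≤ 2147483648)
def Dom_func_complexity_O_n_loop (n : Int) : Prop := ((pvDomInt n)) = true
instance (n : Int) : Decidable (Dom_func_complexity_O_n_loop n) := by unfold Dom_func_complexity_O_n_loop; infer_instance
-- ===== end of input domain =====

-- B replaces A's two coupled counting loops with the closed form max(n, 0): simpler (O(1) vs O(n)).

-- ===== PORT A =====
-- the inner `while j < n` loop: state (c, i, j), each pass does c+=1; j+=1; i+=1
def pyInnerLoop (n c i j : Int) : Int × Int × Int :=
  if h : j < n then pyInnerLoop n (c + 1) (i + 1) (j + 1)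
  else (c, i, j)
termination_by (n - j).toNat
decreasing_by omega

-- outer `while i < n` with initial state c=i=j=0: its first test is `0 < n`;
-- after one full inner pass i = n, so the second outer test fails and c is returned.
def func_complexity_O_n_loop (n : Int) : Int :=
  if 0 < n then (pyInnerLoop n 0 0 0).1 else 0

-- ===== PORT B =====
def func_complexity_O_n_loop_alt (n : Int) : Int := if n > 0 then n else 0

-- ===== PRECONDITION & SPEC =====
def Spec_func_complexity_O_n_loop (n : Int) (out : Int) : Prop := out = func_complexity_O_n_loop_alt n
instance (n : Int) (out : Int) : Decidable (Spec_func_complexity_O_n_loop n out) := by unfold Spec_func_complexity_O_n_loop; infer_instance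

-- ===== CLAIM (what is proved, stated in full; the proofs are below) =====
def Claim_equal_func_complexity_O_n_loop : Prop := ∀ (n : Int), Dom_func_complexity_O_n_loop n → Spec_func_complexity_O_n_loop n (func_complexity_O_n_loop n)

-- ===== LEMMAS AND PROOFS =====
theorem pyInnerLoop_count (n : Int) : ∀ (k : Nat) (c i j : Int), j ≤ n → (n - j).toNat = k →
    pyInnerLoop n c i j = (c + (n - j), i + (n - j), n) := by
  intro k
  induction k with
  | zero =>
    intro c i j hj hk
    have hjn : j = n := by omega
    rw [pyInnerLoop]
    simp [hjn]
  | succ m ih =>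
    intro c i j hj hk
    have hlt : j < n := by omega
    rw [pyInnerLoop]
    simp only [hlt, dif_pos]
    have := ih (c + 1) (i + 1) (j + 1) (by omega) (by omega)
    rw [this]
    simp only [Prod.mk.injEq]
    exact ⟨by omega, by omega, trivial⟩

-- ===== VERDICT (by name: the statement is the Claim_ definition above) =====
theorem func_complexity_O_n_loop_spec : Claim_equal_func_complexity_O_n_loop := by
  intro n _
  unfold Spec_func_complexity_O_n_loop func_complexity_O_n_loop func_complexity_O_n_loop_alt
  by_cases h : 0 < n
  · simp only [h, if_pos]
    rw [pyInnerLoop_count n (n - 0).toNat 0 0 0 (by omega) rfl]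
    simp
  · simp [h]
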